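-- pv_equiv track=rewrite | github.com/rdgztorres19/performance-autonomous-agent | test/scripts/branch-misprediction.py | sum_with_predictable_branch
-- ===== SOURCE A (Python) =====
-- def sum_with_predictable_branch(data):
--     """BETTER: Sorted data -> predictable (all even then all odd)."""
--     total = 0
--     for x in data:
--         if x % 2 == 0:
--             total += x
--         else:
--             total -= x
--     return total
-- ===== SOURCE B (Python) =====
-- def sum_with_predictable_branch(data):
--     """Two independent filtered passes: sum of evens minus sum of odds."""
--     evens = sum(x for x in data if x % 2 == 0)
--     odds = sum(x for x in data if x % 2 != 0)
--     return evens - odds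
-- ===== Notes on version B (the rewrite author's own statement) =====
-- stated objective: alternative
-- what changed: Replaced the single branched accumulation loop with two independent filtered summation passes (sum of evens, sum of odds) combined by one subtraction.
import Mathlib
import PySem

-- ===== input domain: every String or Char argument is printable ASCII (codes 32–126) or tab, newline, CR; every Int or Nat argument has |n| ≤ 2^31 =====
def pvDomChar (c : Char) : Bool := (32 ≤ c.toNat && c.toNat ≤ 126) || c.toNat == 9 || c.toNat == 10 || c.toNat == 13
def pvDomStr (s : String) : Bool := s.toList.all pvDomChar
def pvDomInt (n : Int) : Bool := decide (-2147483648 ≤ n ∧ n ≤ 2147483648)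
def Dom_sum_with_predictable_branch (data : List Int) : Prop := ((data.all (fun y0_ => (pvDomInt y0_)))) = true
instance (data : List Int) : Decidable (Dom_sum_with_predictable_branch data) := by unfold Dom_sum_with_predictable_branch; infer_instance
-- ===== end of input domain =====

-- B computes the same result by two independent filtered sums (evens minus odds) instead of one branched loop; same O(n) cost.
-- ===== PORT A =====
def sum_with_predictable_branch (data : List Int) : Int :=
  data.foldl (fun total x => if PySem.Int.mod x 2 = 0 then total + x else total - x) 0

-- ===== PORT B =====
def sum_with_predictable_branch_alt (data : List Int) : Int :=
  (data.filter (fun x => PySem.Int.mod x 2 = 0)).sum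
    - (data.filter (fun x => PySem.Int.mod x 2 ≠ 0)).sum

-- ===== PRECONDITION & SPEC =====
def Spec_sum_with_predictable_branch (data : List Int) (out : Int) : Prop := out = sum_with_predictable_branch_alt data
instance (data : List Int) (out : Int) : Decidable (Spec_sum_with_predictable_branch data out) := by unfold Spec_sum_with_predictable_branch; infer_instance

-- ===== CLAIM (what is proved, stated in full; the proofs are below) =====
def Claim_equal_sum_with_predictable_branch : Prop := ∀ (data : List Int), Dom_sum_with_predictable_branch data → Spec_sum_with_predictable_branch data (sum_with_predictable_branch data)

-- ===== LEMMAS AND PROOFS =====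

-- ===== VERDICT (by name: the statement is the Claim_ definition above) =====
theorem branch_foldl_eq (data : List Int) (t : Int) :
    data.foldl (fun total x => if PySem.Int.mod x 2 = 0 then total + x else total - x) t
      = t + (data.filter (fun x => PySem.Int.mod x 2 = 0)).sum
          - (data.filter (fun x => PySem.Int.mod x 2 ≠ 0)).sum := by
  induction data generalizing t with
  | nil => simp
  | cons x xs ih =>
    simp only [List.foldl_cons, List.filter_cons]
    by_cases h : PySem.Int.mod x 2 = 0
    · rw [if_pos h, ih, if_pos (by simp at h ⊢; omega), if_neg (by simp at h ⊢; omega),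
        List.sum_cons]
      ring
    · rw [if_neg h, ih, if_neg (by simp at h ⊢; omega), if_pos (by simp at h ⊢; omega),
        List.sum_cons]
      ring

theorem sum_with_predictable_branch_spec : Claim_equal_sum_with_predictable_branch := by
  intro data _
  unfold Spec_sum_with_predictable_branch sum_with_predictable_branch sum_with_predictable_branch_alt
  rw [branch_foldl_eq]; ring
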